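-- pv_equiv track=rewrite | github.com/sl-633/enr-recognizer | src/datasets/cross_encoder.py | merge_fp_maps
-- ===== SOURCE A (Python) =====
-- from typing import Any, Dict, Iterable, List, Optional, Sequence, Tuple
--
-- def merge_fp_maps(fp_maps: List[Dict[str, List[List[str]]]]) -> Dict[str, List[List[str]]]:
--     merged: Dict[str, List[List[str]]] = {}
--     for m in fp_maps:
--         for doc_id, items in m.items():
--             if doc_id not in merged:
--                 merged[doc_id] = []
--             merged[doc_id].extend(items)
--
--     # dedup per doc by (id,name)
--     for doc_id, items in merged.items():
--         seen: set[str] = set()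
--         uniq: List[List[str]] = []
--         for it in items:
--             if not isinstance(it, list) or len(it) < 2:
--                 continue
--             cid, name = str(it[0]), str(it[1])
--             key = f"{cid}\t{name}"
--             if key in seen:
--                 continue
--             seen.add(key)
--             uniq.append([cid, name])
--         merged[doc_id] = uniq
--
--     return merged
-- ===== SOURCE B (Python) =====
-- def merge_fp_maps(fp_maps):
--     merged = {}
--     seen = {}
--     for m in fp_maps:
--         for doc_id, items in m.items():
--             if doc_id not in merged:
--                 merged[doc_id] = []
--                 seen[doc_id] = set()
--             out = merged[doc_id]
--             s = seen[doc_id]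
--             for it in items:
--                 if not isinstance(it, list) or len(it) < 2:
--                     continue
--                 cid, name = str(it[0]), str(it[1])
--                 key = f"{cid}\t{name}"
--                 if key not in s:
--                     s.add(key)
--                     out.append([cid, name])
--     return merged
-- ===== Notes on version B (the rewrite author's own statement) =====
-- stated objective: alternative
-- what changed: B fuses A's two phases (build full per-doc concatenated lists, then re-scan each to dedup) into a single pass that maintains per-doc seen-key sets and deduplicated output lists simultaneously, never materialising the concatenated intermediate lists.
import Mathlib
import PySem

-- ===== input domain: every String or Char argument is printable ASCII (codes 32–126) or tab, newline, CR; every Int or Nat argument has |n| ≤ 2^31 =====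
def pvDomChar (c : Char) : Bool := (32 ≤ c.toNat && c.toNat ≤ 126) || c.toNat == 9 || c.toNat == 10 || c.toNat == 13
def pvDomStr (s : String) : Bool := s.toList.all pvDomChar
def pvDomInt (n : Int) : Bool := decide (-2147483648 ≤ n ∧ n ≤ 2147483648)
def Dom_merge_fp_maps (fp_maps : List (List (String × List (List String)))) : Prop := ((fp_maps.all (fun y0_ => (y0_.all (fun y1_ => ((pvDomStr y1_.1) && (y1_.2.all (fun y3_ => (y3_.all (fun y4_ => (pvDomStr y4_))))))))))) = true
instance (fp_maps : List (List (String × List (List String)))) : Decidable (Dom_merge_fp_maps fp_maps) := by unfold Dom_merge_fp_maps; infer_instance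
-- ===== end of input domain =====

-- B fuses A's two phases (concatenate everything, then re-scan to dedup) into ONE pass that
-- maintains, per doc_id, the deduplicated output list and its seen-key set simultaneously.
-- Note: A mutates nothing observable to the caller; equivalence is about the return value.

-- Both Pythons process one item identically: skip if len < 2, key = f"{cid}\t{name}",
-- append [cid, name] iff the key is new; shared helper for that identical inner body.
-- (isinstance(it, list) is always true under the type convention List (List String).)
def pvItemStep (st : List (List String) × PySem.Set String) (it : List String) :
    List (List String) × PySem.Set String :=
  match it with
  | cid :: name :: _ =>
      let key := cid ++ "\t" ++ name
      if PySem.Set.contains st.2 key then st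
      else (st.1 ++ [[cid, name]], PySem.Set.add st.2 key)
  | _ => st

-- ===== PORT A =====
-- phase 1 body: merged.setdefault-style guard, then merged[doc_id].extend(items)
def pvStepA (d : PySem.Dict String (List (List String))) (p : String × List (List String)) :
    PySem.Dict String (List (List String)) :=
  let d := if d.contains p.1 then d else d.insert p.1 []
  d.modify p.1 [] (· ++ p.2)

-- phase 2 per-doc dedup loop (seen : set, uniq : list)
def pvDedupDoc (items : List (List String)) : List (List String) :=
  (items.foldl pvItemStep ([], PySem.Set.empty)).1

def merge_fp_maps (fp_maps : List (List (String × List (List String)))) :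
    List (String × List (List String)) :=
  let merged := fp_maps.foldl (fun d m => m.foldl pvStepA d) PySem.Dict.empty
  let merged := merged.items.foldl (fun d p => d.insert p.1 (pvDedupDoc p.2)) merged
  merged.items

-- ===== PORT B =====
-- one fused pass: state = (merged : doc → deduped list, seen : doc → key set)
def pvStepB (st : PySem.Dict String (List (List String)) × PySem.Dict String (PySem.Set String))
    (p : String × List (List String)) :
    PySem.Dict String (List (List String)) × PySem.Dict String (PySem.Set String) :=
  let st := if st.1.contains p.1 then st
            else (st.1.insert p.1 [], st.2.insert p.1 PySem.Set.empty)
  let r := p.2.foldl pvItemStep (st.1.getD p.1 [], st.2.getD p.1 [])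
  (st.1.insert p.1 r.1, st.2.insert p.1 r.2)

def merge_fp_maps_alt (fp_maps : List (List (String × List (List String)))) :
    List (String × List (List String)) :=
  (fp_maps.foldl (fun st m => m.foldl pvStepB st)
    (PySem.Dict.empty, PySem.Dict.empty)).1.items

-- ===== PRECONDITION & SPEC =====
def Spec_merge_fp_maps (fp_maps : List (List (String × List (List String)))) (out : List (String × List (List String))) : Prop := out = merge_fp_maps_alt fp_maps
instance (fp_maps : List (List (String × List (List String)))) (out : List (String × List (List String))) : Decidable (Spec_merge_fp_maps fp_maps out) := by unfold Spec_merge_fp_maps; infer_instance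

-- ===== CLAIM (what is proved, stated in full; the proofs are below) =====
def Claim_equal_merge_fp_maps : Prop := ∀ (fp_maps : List (List (String × List (List String)))), Dom_merge_fp_maps fp_maps → Spec_merge_fp_maps fp_maps (merge_fp_maps fp_maps)

-- ===== LEMMAS AND PROOFS =====

-- the full dedup of a list of items, from an empty seen set
def pvF (xs : List (List String)) : List (List String) × PySem.Set String :=
  xs.foldl pvItemStep ([], PySem.Set.empty)

-- invariant tying A's phase-1 state to B's fused state
def pvInv (dA : PySem.Dict String (List (List String)))
    (dB : PySem.Dict String (List (List String)))
    (sB : PySem.Dict String (PySem.Set String)) : Prop :=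
  dA.keys.Nodup ∧ dB.keys = dA.keys ∧ sB.keys = dA.keys ∧
  (∀ k, dB.getD k [] = (pvF (dA.getD k [])).1) ∧
  (∀ k, sB.getD k [] = (pvF (dA.getD k [])).2)

lemma pvStepA_getD (d : PySem.Dict String (List (List String)))
    (p : String × List (List String)) (j : String) :
    (pvStepA d p).getD j [] = if j = p.1 then d.getD p.1 [] ++ p.2 else d.getD j [] := by
  unfold pvStepA
  by_cases hc : d.contains p.1
  · simp [hc, PySem.Dict.getD_modify]
  · simp only [Bool.not_eq_true] at hc
    simp [hc, PySem.Dict.getD_modify, PySem.Dict.getD_insert,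
      PySem.Dict.getD_of_not_contains d [] hc]
    by_cases h : j = p.1 <;> simp [h]

lemma pvStepA_keys (d : PySem.Dict String (List (List String)))
    (p : String × List (List String)) :
    (pvStepA d p).keys = if d.contains p.1 then d.keys else d.keys ++ [p.1] := by
  unfold pvStepA
  by_cases hc : d.contains p.1
  · simp [hc, PySem.Dict.keys_modify, PySem.Dict.keys_insert_of_contains _ _ hc]
  · simp only [Bool.not_eq_true] at hc
    simp [hc, PySem.Dict.keys_modify,
      PySem.Dict.keys_insert_of_contains _ _ (PySem.Dict.contains_insert_self d p.1 []),
      PySem.Dict.keys_insert_of_not_contains _ _ hc]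

lemma pvInv_step (dA : PySem.Dict String (List (List String)))
    (dB : PySem.Dict String (List (List String)))
    (sB : PySem.Dict String (PySem.Set String))
    (p : String × List (List String)) (h : pvInv dA dB sB) :
    pvInv (pvStepA dA p) (pvStepB (dB, sB) p).1 (pvStepB (dB, sB) p).2 := by
  obtain ⟨hnd, hkB, hkS, hvB, hvS⟩ := h
  have hcontains : dB.contains p.1 = dA.contains p.1 := by
    rw [PySem.Dict.contains_eq_decide_mem_keys, PySem.Dict.contains_eq_decide_mem_keys, hkB]
  have hF : ∀ xs : List (List String),
      xs = dA.getD p.1 [] → p.2.foldl pvItemStep ((pvF xs).1, (pvF xs).2)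
        = pvF (dA.getD p.1 [] ++ p.2) := by
    intro xs hxs; subst hxs; rw [Prod.mk.eta]; unfold pvF; rw [List.foldl_append]
  by_cases hc : dA.contains p.1
  · -- doc already present: B leaves the guard, reads current value, folds, writes back
    have hB1 : (pvStepB (dB, sB) p).1
        = dB.insert p.1 (pvF (dA.getD p.1 [] ++ p.2)).1 := by
      unfold pvStepB
      simp only [hcontains, hc, if_pos]
      rw [hvB, hvS, hF _ rfl]
    have hS1 : (pvStepB (dB, sB) p).2
        = sB.insert p.1 (pvF (dA.getD p.1 [] ++ p.2)).2 := by
      unfold pvStepB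
      simp only [hcontains, hc, if_pos]
      rw [hvB, hvS, hF _ rfl]
    have hcB : dB.contains p.1 = true := by rw [hcontains]; exact hc
    have hcS : sB.contains p.1 = true := by
      rw [PySem.Dict.contains_eq_decide_mem_keys, hkS,
        ← hkB, ← PySem.Dict.contains_eq_decide_mem_keys]; exact hcB
    refine ⟨?_, ?_, ?_, ?_, ?_⟩
    · rw [pvStepA_keys, if_pos hc]; exact hnd
    · rw [hB1, PySem.Dict.keys_insert_of_contains _ _ hcB, pvStepA_keys, if_pos hc, hkB]
    · rw [hS1, PySem.Dict.keys_insert_of_contains _ _ hcS, pvStepA_keys, if_pos hc, hkS]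
    · intro k
      rw [hB1, PySem.Dict.getD_insert, pvStepA_getD]
      by_cases hk : k = p.1 <;> simp [hk, hvB]
    · intro k
      rw [hS1, PySem.Dict.getD_insert, pvStepA_getD]
      by_cases hk : k = p.1 <;> simp [hk, hvS]
  · -- new doc: both sides register it, value becomes pvF of its items
    have hc' : dA.contains p.1 = false := by simpa using hc
    have hcB' : dB.contains p.1 = false := by rw [hcontains]; exact hc'
    have hA0 : dA.getD p.1 [] = [] := PySem.Dict.getD_of_not_contains dA [] hc'
    have hB1 : (pvStepB (dB, sB) p).1
        = (dB.insert p.1 []).insert p.1 (pvF (dA.getD p.1 [] ++ p.2)).1 := by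
      unfold pvStepB
      simp only [hcontains, hc', Bool.false_eq_true, if_false]
      rw [PySem.Dict.getD_insert_self, PySem.Dict.getD_insert_self]
      have : p.2.foldl pvItemStep (([] : List (List String)), PySem.Set.empty)
          = pvF (dA.getD p.1 [] ++ p.2) := by
        rw [hA0]; rfl
      rw [this]
    have hS1 : (pvStepB (dB, sB) p).2
        = (sB.insert p.1 PySem.Set.empty).insert p.1 (pvF (dA.getD p.1 [] ++ p.2)).2 := by
      unfold pvStepB
      simp only [hcontains, hc', Bool.false_eq_true, if_false]
      rw [PySem.Dict.getD_insert_self, PySem.Dict.getD_insert_self]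
      have : p.2.foldl pvItemStep (([] : List (List String)), PySem.Set.empty)
          = pvF (dA.getD p.1 [] ++ p.2) := by
        rw [hA0]; rfl
      rw [this]
    have hcS' : sB.contains p.1 = false := by
      rw [PySem.Dict.contains_eq_decide_mem_keys, hkS, ← hkB,
        ← PySem.Dict.contains_eq_decide_mem_keys]; exact hcB'
    have hmem : p.1 ∉ dA.keys := by
      rw [PySem.Dict.contains_eq_decide_mem_keys] at hc'; simpa using hc'
    refine ⟨?_, ?_, ?_, ?_, ?_⟩
    · rw [pvStepA_keys, if_neg (by simp [hc'])]
      exact List.Nodup.append hnd (List.nodup_singleton _) (by simpa using hmem)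
    · rw [hB1, PySem.Dict.insert_insert_self,
        PySem.Dict.keys_insert_of_not_contains _ _ hcB', pvStepA_keys,
        if_neg (by simp [hc']), hkB]
    · rw [hS1, PySem.Dict.insert_insert_self,
        PySem.Dict.keys_insert_of_not_contains _ _ hcS', pvStepA_keys,
        if_neg (by simp [hc']), hkS]
    · intro k
      rw [hB1, PySem.Dict.insert_insert_self, PySem.Dict.getD_insert, pvStepA_getD]
      by_cases hk : k = p.1 <;> simp [hk, hvB]
    · intro k
      rw [hS1, PySem.Dict.insert_insert_self, PySem.Dict.getD_insert, pvStepA_getD]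
      by_cases hk : k = p.1 <;> simp [hk, hvS]

lemma pvInv_foldl (pairs : List (String × List (List String)))
    (dA : PySem.Dict String (List (List String)))
    (dB : PySem.Dict String (List (List String)))
    (sB : PySem.Dict String (PySem.Set String)) (h : pvInv dA dB sB) :
    pvInv (pairs.foldl pvStepA dA) (pairs.foldl pvStepB (dB, sB)).1
      (pairs.foldl pvStepB (dB, sB)).2 := by
  induction pairs generalizing dA dB sB with
  | nil => exact h
  | cons p rest ih =>
      have h' := pvInv_step dA dB sB p h
      simpa [List.foldl_cons, Prod.mk.eta] using
        ih (pvStepA dA p) (pvStepB (dB, sB) p).1 (pvStepB (dB, sB) p).2 h'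

-- getD through A's phase-2 overwrite loop
lemma pv_getD_foldl_insert_not_mem (g : String × List (List String) → List (List String))
    (l : List (String × List (List String))) (d : PySem.Dict String (List (List String)))
    (k : String) (hk : k ∉ l.map Prod.fst) :
    (l.foldl (fun d p => d.insert p.1 (g p)) d).getD k [] = d.getD k [] := by
  induction l generalizing d with
  | nil => rfl
  | cons p rest ih =>
      simp only [List.map_cons, List.mem_cons, not_or] at hk
      rw [List.foldl_cons, ih _ hk.2, PySem.Dict.getD_insert_of_ne _ _ _ hk.1]

lemma pv_getD_foldl_insert_mem (g : String × List (List String) → List (List String))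
    (l : List (String × List (List String))) (d : PySem.Dict String (List (List String)))
    (k : String) (v : List (List String)) (hnd : (l.map Prod.fst).Nodup)
    (hmem : (k, v) ∈ l) :
    (l.foldl (fun d p => d.insert p.1 (g p)) d).getD k [] = g (k, v) := by
  induction l generalizing d with
  | nil => exact absurd hmem (List.not_mem_nil)
  | cons p rest ih =>
      simp only [List.map_cons, List.nodup_cons] at hnd
      rcases List.mem_cons.mp hmem with h | h
      · subst h
        rw [List.foldl_cons,
          pv_getD_foldl_insert_not_mem g rest _ k hnd.1, PySem.Dict.getD_insert_self]
      · rw [List.foldl_cons]; exact ih _ hnd.2 h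

-- the common characterization: both results are dA.keys decorated with the full dedup
lemma pv_final (dA : PySem.Dict String (List (List String)))
    (dB : PySem.Dict String (List (List String)))
    (sB : PySem.Dict String (PySem.Set String)) (h : pvInv dA dB sB) :
    (dA.items.foldl (fun d p => d.insert p.1 (pvDedupDoc p.2)) dA).items = dB.items := by
  obtain ⟨hnd, hkB, hkS, hvB, hvS⟩ := h
  set m2 := dA.items.foldl (fun d p => d.insert p.1 (pvDedupDoc p.2)) dA with hm2
  have hkeysitems : dA.items.map Prod.fst = dA.keys := rfl
  have hkeys : m2.keys = dA.keys := by
    rw [hm2, PySem.Dict.keys_foldl_insert_key dA.items Prod.fst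
      (fun _ p => pvDedupDoc p.2) dA, hkeysitems,
      PySem.Set.update_eq_append_filter]
    have : List.filter (fun y => !PySem.Set.contains dA.keys y)
        (PySem.Set.ofList dA.keys) = [] := by
      apply List.filter_eq_nil_iff.mpr
      intro a ha
      have : a ∈ dA.keys := PySem.Set.mem_ofList _ _ |>.mp ha
      simp [PySem.Set.contains_eq_listContains, this]
    rw [this, List.append_nil]
  have hnd2 : m2.keys.Nodup := by rw [hkeys]; exact hnd
  have hndB : dB.keys.Nodup := by rw [hkB]; exact hnd
  have hgetD : ∀ k ∈ dA.keys, m2.getD k [] = pvDedupDoc (dA.getD k []) := by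
    intro k hk
    have : (k, dA.getD k []) ∈ dA.items := by
      rw [← hkeysitems] at hk
      obtain ⟨p, hp, hp1⟩ := List.mem_map.mp hk
      subst hp1
      have hv := PySem.Dict.getD_of_mem_items dA (show (p.1, p.2) ∈ dA.items by simpa) hnd []
      rw [hv]; simpa
    exact pv_getD_foldl_insert_mem (fun p => pvDedupDoc p.2) dA.items dA k _
      (by rw [hkeysitems]; exact hnd) this
  rw [PySem.Dict.items_eq_map_keys m2 hnd2 [], PySem.Dict.items_eq_map_keys dB hndB [],
    hkeys, hkB]
  apply List.map_congr_left
  intro k hk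
  rw [hgetD k hk, hvB]
  rfl

-- ===== VERDICT (by name: the statement is the Claim_ definition above) =====
theorem merge_fp_maps_spec : Claim_equal_merge_fp_maps := by
  intro fp_maps _
  unfold Spec_merge_fp_maps merge_fp_maps merge_fp_maps_alt
  have hinit : pvInv PySem.Dict.empty PySem.Dict.empty PySem.Dict.empty :=
    ⟨by simp [PySem.Dict.keys_empty], by rfl, by rfl,
     fun k => by simp [PySem.Dict.getD_empty]; rfl,
     fun k => by simp [PySem.Dict.getD_empty]; rfl⟩
  have hA : fp_maps.foldl (fun d m => m.foldl pvStepA d) PySem.Dict.empty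
      = fp_maps.flatten.foldl pvStepA PySem.Dict.empty := (List.foldl_flatten).symm
  have hB : fp_maps.foldl (fun st m => m.foldl pvStepB st) (PySem.Dict.empty, PySem.Dict.empty)
      = fp_maps.flatten.foldl pvStepB (PySem.Dict.empty, PySem.Dict.empty) :=
    (List.foldl_flatten).symm
  rw [hA, hB]
  have h := pvInv_foldl fp_maps.flatten PySem.Dict.empty PySem.Dict.empty PySem.Dict.empty hinit
  exact pv_final _ _ _ h
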